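-- pv_equiv track=rewrite | github.com/AlgernonSolutions/surgeon | src/toll_booth/tasks/parsers/dcdbh/__init__.py | _check_form_bookend
-- ===== SOURCE A (Python) =====
-- def _check_form_bookend(note_form_strings, bookend_start, bookend_finish):
--     found = []
--     for pointer, entry in enumerate(note_form_strings):
--         if entry == bookend_start:
--             segment = []
--             for sub_entry in note_form_strings[pointer+1:]:
--                 if sub_entry == bookend_finish:
--                     break
--                 segment.append(sub_entry)
--             found.append(segment)
--     return found
-- ===== SOURCE B (Python) =====
-- def _check_form_bookend(note_form_strings, bookend_start, bookend_finish):
--     # single backward pass: seg_rev holds (reversed) the segment that starts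
--     # just after the current position and runs to the next bookend_finish
--     found = []
--     seg_rev = []
--     for entry in reversed(note_form_strings):
--         if entry == bookend_start:
--             found.append(seg_rev[::-1])
--         if entry == bookend_finish:
--             seg_rev = []
--         else:
--             seg_rev.append(entry)
--     found.reverse()
--     return found
-- ===== Notes on version B (the rewrite author's own statement) =====
-- stated objective: alternative
-- what changed: Replaced the nested forward scan (for each start marker, re-scan the remaining list for the next finish) by one backward pass that maintains the current segment-to-next-finish; each element is visited once plus output construction.
import Mathlib
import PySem

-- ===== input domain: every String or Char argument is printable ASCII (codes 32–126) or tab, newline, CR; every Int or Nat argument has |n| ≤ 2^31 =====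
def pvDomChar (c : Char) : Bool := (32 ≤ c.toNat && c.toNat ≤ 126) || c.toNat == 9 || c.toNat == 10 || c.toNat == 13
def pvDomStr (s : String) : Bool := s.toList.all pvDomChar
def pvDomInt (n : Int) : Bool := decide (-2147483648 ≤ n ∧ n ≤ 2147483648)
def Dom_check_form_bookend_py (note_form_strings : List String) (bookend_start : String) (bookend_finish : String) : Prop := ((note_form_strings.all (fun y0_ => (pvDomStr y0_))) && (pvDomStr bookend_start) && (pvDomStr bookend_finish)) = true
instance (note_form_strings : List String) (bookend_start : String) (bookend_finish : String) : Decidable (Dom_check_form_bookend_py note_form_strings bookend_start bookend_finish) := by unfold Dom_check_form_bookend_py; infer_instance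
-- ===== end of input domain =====

-- B replaces A's nested forward re-scan by a single backward pass maintaining the current segment.
-- ===== PORT A =====
-- inner 'for sub_entry in note_form_strings[pointer+1:]: if == finish: break; segment.append'
def pvSegLoop (bookend_finish : String) : List String → List String
  | [] => []
  | x :: rest => if x == bookend_finish then [] else x :: pvSegLoop bookend_finish rest

def check_form_bookend_py (note_form_strings : List String) (bookend_start : String) (bookend_finish : String) : List (List String) :=
  (PySem.List.enumerate note_form_strings 0).foldl
    (fun found pe =>
      if pe.2 == bookend_start then
        found ++ [pvSegLoop bookend_finish (PySem.List.slice note_form_strings (some (pe.1 + 1)) none)]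
      else found) []

-- ===== PORT B =====
-- state (found, seg_rev); iterate reversed(note_form_strings); reverse found at the end
def check_form_bookend_py_alt (note_form_strings : List String) (bookend_start : String) (bookend_finish : String) : List (List String) :=
  let st := note_form_strings.reverse.foldl
    (fun st entry =>
      let found := if entry == bookend_start then st.1 ++ [st.2.reverse] else st.1
      let seg_rev := if entry == bookend_finish then [] else st.2 ++ [entry]
      (found, seg_rev)) (([] : List (List String)), ([] : List String))
  st.1.reverse

-- ===== PRECONDITION & SPEC =====
def Spec_check_form_bookend_py (note_form_strings : List String) (bookend_start : String) (bookend_finish : String) (out : List (List String)) : Prop := out = check_form_bookend_py_alt note_form_strings bookend_start bookend_finish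
instance (note_form_strings : List String) (bookend_start : String) (bookend_finish : String) (out : List (List String)) : Decidable (Spec_check_form_bookend_py note_form_strings bookend_start bookend_finish out) := by unfold Spec_check_form_bookend_py; infer_instance

-- ===== CLAIM (what is proved, stated in full; the proofs are below) =====
def Claim_equal_check_form_bookend_py : Prop := ∀ (note_form_strings : List String) (bookend_start : String) (bookend_finish : String), Dom_check_form_bookend_py note_form_strings bookend_start bookend_finish → Spec_check_form_bookend_py note_form_strings bookend_start bookend_finish (check_form_bookend_py note_form_strings bookend_start bookend_finish)

-- ===== LEMMAS AND PROOFS =====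

-- ===== VERDICT (by name: the statement is the Claim_ definition above) =====
-- proof-side characterisation of the result
def pvG (s f : String) : List String → List (List String)
  | [] => []
  | x :: rest => (if x == s then [pvSegLoop f rest] else []) ++ pvG s f rest

theorem pvFoldA (s f : String) (L : List String) : ∀ (t : List String) (k : Nat) (acc : List (List String)),
    L.drop k = t →
    (PySem.List.enumerate t k).foldl
      (fun found pe =>
        if pe.2 == s then
          found ++ [pvSegLoop f (PySem.List.slice L (some (pe.1 + 1)) none)]
        else found) acc = acc ++ pvG s f t := by
  intro t
  induction t with
  | nil => intro k acc h; simp [PySem.List.enumerate, pvG]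
  | cons x rest ih =>
    intro k acc h
    have hrest : L.drop (k + 1) = rest := by
      rw [← List.drop_drop, h]; simp
    have hslice : PySem.List.slice L (some ((k : Int) + 1)) none = rest := by
      have : ((k : Int) + 1) = ((k + 1 : Nat) : Int) := by push_cast; ring
      rw [this, PySem.List.slice_from_natCast, hrest]
    rw [PySem.List.enumerate_cons]
    simp only [List.foldl_cons]
    have ih' := ih (k + 1) (if (x == s) = true then acc ++ [pvSegLoop f (PySem.List.slice L (some ((k : Int) + 1)) none)] else acc) hrest
    push_cast at ih'
    rw [ih']
    by_cases hx : x == s <;> simp [pvG, hx, hslice]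

theorem pvFoldB (s f : String) : ∀ (t : List String),
    t.reverse.foldl
      (fun st entry =>
        let found := if entry == s then st.1 ++ [st.2.reverse] else st.1
        let seg_rev := if entry == f then [] else st.2 ++ [entry]
        (found, seg_rev)) (([] : List (List String)), ([] : List String))
      = ((pvG s f t).reverse, (pvSegLoop f t).reverse) := by
  intro t
  induction t with
  | nil => simp [pvG, pvSegLoop]
  | cons x rest ih =>
    rw [List.reverse_cons, List.foldl_append, ih]
    simp only [List.foldl_cons, List.foldl_nil, Prod.mk.injEq]
    refine ⟨?_, ?_⟩
    · by_cases hx : x == s <;> simp [pvG, hx]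
    · by_cases hx : x == f <;> simp [pvSegLoop, hx]

theorem check_form_bookend_py_spec : Claim_equal_check_form_bookend_py := by
  intro l s f _
  unfold Spec_check_form_bookend_py check_form_bookend_py check_form_bookend_py_alt
  have hA := pvFoldA s f l l 0 [] (by simp)
  simp only [Nat.cast_zero] at hA
  rw [hA, pvFoldB s f l]
  simp
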